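-- pv_equiv track=rewrite | github.com/johanolssons/AdventOfCode | 2025/Day3/solutionDay3.py | list_lookup
-- ===== SOURCE A (Python) =====
-- def list_lookup(l: list[int], skip_p: list[int] = None) -> int:
--     p = 0
--     max_n = 0
--     max_p = 0
--     for i in l:
--
--         # If num in current pos is bigger than current max, assing new max
--         # Only if the current position should not be skipped.
--         if i>max_n and p not in skip_p:
--             max_n = i
--             max_p = p
--
--         p += 1 # Next position
--     return(max_p)
-- ===== SOURCE B (Python) =====
-- def list_lookup(l: list[int], skip_p: list[int] = None) -> int:
--     # Two separate passes: collect the non-skipped (position, value) pairs,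
--     # take the max value (floored at 0), then find the leftmost position holding it.
--     pairs = [(p, l[p]) for p in range(len(l)) if p not in skip_p]
--     best = max((v for _, v in pairs), default=0)
--     if best <= 0:
--         return 0
--     for p, v in pairs:
--         if v == best:
--             return p
--     return 0
-- ===== Notes on version B (the rewrite author's own statement) =====
-- stated objective: alternative
-- what changed: A's single combined scan (running max and its position updated together) is replaced by two differently-shaped passes over a precomputed filtered (position, value) list: max of the values with default 0, then index-of the first pair holding that max.
import Mathlib
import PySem

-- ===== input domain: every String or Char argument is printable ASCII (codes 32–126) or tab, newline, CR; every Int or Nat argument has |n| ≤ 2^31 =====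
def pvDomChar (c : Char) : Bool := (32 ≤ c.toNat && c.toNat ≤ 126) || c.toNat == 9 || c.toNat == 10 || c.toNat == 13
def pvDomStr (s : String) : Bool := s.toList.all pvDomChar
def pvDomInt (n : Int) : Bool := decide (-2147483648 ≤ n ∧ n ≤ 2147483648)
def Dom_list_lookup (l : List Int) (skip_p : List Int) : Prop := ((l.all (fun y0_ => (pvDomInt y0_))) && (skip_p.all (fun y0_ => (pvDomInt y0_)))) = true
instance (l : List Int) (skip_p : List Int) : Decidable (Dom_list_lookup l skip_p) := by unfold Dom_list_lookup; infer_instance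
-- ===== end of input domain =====

-- B replaces A's single combined argmax scan by two passes over the non-skipped
-- (position, value) pairs: max value first, then index-of; objective: alternative decomposition.

-- ===== PORT A =====
-- single scan carrying (p, max_n, max_p)
def list_lookup (l : List Int) (skip_p : List Int) : Int :=
  let st := l.foldl (fun (st : Int × Int × Int) i =>
      if i > st.2.1 ∧ st.1 ∉ skip_p then (st.1 + 1, i, st.1)
      else (st.1 + 1, st.2.1, st.2.2)) (0, 0, 0)
  st.2.2

-- ===== PORT B =====
-- pairs = [(p, l[p]) for p in range(len(l)) if p not in skip_p]; l.getD p 0 is exact here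
-- since p < len(l); best = max(values, default=0); then leftmost position holding best.
def list_lookup_alt (l : List Int) (skip_p : List Int) : Int :=
  let pairs := ((List.range l.length).filter (fun (p : Nat) => decide ((p : Int) ∉ skip_p))).map
      (fun (p : Nat) => ((p : Int), l.getD p 0))
  let best := (PySem.List.max? (pairs.map (fun pv => pv.2)) (fun v => v)).getD 0
  if best ≤ 0 then 0
  else
    match pairs.find? (fun pv => pv.2 == best) with
    | some pv => pv.1
    | none => 0

-- ===== PRECONDITION & SPEC =====
def Spec_list_lookup (l : List Int) (skip_p : List Int) (out : Int) : Prop := out = list_lookup_alt l skip_p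
instance (l : List Int) (skip_p : List Int) (out : Int) : Decidable (Spec_list_lookup l skip_p out) := by unfold Spec_list_lookup; infer_instance

-- ===== CLAIM (what is proved, stated in full; the proofs are below) =====
def Claim_equal_list_lookup : Prop := ∀ (l : List Int) (skip_p : List Int), Dom_list_lookup l skip_p → Spec_list_lookup l skip_p (list_lookup l skip_p)

-- ===== LEMMAS AND PROOFS =====

-- enumerated pairs starting at position p0
def pvEnum (p0 : Int) : List Int → List (Int × Int)
  | [] => []
  | v :: t => (p0, v) :: pvEnum (p0 + 1) t

-- the non-skipped (position, value) pairs starting at position p0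
def pvFP (skip_p : List Int) (p0 : Int) : List Int → List (Int × Int)
  | [] => []
  | v :: t => if p0 ∈ skip_p then pvFP skip_p (p0 + 1) t
              else (p0, v) :: pvFP skip_p (p0 + 1) t

-- A's loop restricted to the filtered pairs
def pvRun : List (Int × Int) → Int → Int → Int × Int
  | [], mn, mp => (mn, mp)
  | (p, v) :: t, mn, mp => if mn < v then pvRun t v p else pvRun t mn mp

def pvBest (fp : List (Int × Int)) (a : Int) : Int := (fp.map Prod.snd).foldl max a

lemma pvA_run (skip_p : List Int) : ∀ (l : List Int) (p0 mn mp : Int),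
    (l.foldl (fun (st : Int × Int × Int) i =>
      if i > st.2.1 ∧ st.1 ∉ skip_p then (st.1 + 1, i, st.1)
      else (st.1 + 1, st.2.1, st.2.2)) (p0, mn, mp)).2
    = pvRun (pvFP skip_p p0 l) mn mp := by
  intro l
  induction l with
  | nil => intro p0 mn mp; simp [pvFP, pvRun]
  | cons v t ih =>
    intro p0 mn mp
    by_cases hs : p0 ∈ skip_p
    · simp [pvFP, hs, List.foldl_cons, ih]
    · by_cases hv : mn < v
      · simp [pvFP, hs, hv, List.foldl_cons, pvRun, ih]
      · simp [pvFP, hs, hv, List.foldl_cons, pvRun, ih]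

lemma pvEnum_range (l : List Int) : ∀ (c : Int),
    (List.range l.length).map (fun (p : Nat) => ((p : Int) + c, l.getD p 0)) = pvEnum c l := by
  induction l with
  | nil => intro c; simp [pvEnum]
  | cons v t ih =>
    intro c
    simp only [List.length_cons, List.range_succ_eq_map, List.map_cons, List.map_map, pvEnum]
    congr 1
    · simp
    · rw [← ih (c + 1)]
      apply List.map_congr_left
      intro p _
      simp [Function.comp]
      ring

lemma pvFP_filter (skip_p : List Int) : ∀ (l : List Int) (p0 : Int),
    (pvEnum p0 l).filter (fun pv => decide (pv.1 ∉ skip_p)) = pvFP skip_p p0 l := by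
  intro l
  induction l with
  | nil => intro p0; simp [pvEnum, pvFP]
  | cons v t ih =>
    intro p0
    by_cases hs : p0 ∈ skip_p
    · simp [pvEnum, pvFP, hs]
      simpa using ih (p0 + 1)
    · simp [pvEnum, pvFP, hs]
      simpa using ih (p0 + 1)

lemma pv_fold_max_cons : ∀ (vt : List Int) (a v : Int),
    List.foldl max a (v :: vt) = max a (List.foldl max v vt) := by
  intro vt
  induction vt with
  | nil => intro a v; simp
  | cons w vt ih =>
    intro a v
    have h1 : List.foldl max a (v :: w :: vt) = List.foldl max (max a v) (w :: vt) := by simp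
    rw [h1, ih (max a v) w, ih v w]
    rw [max_assoc]

lemma pvBest_ge (fp : List (Int × Int)) : ∀ (a : Int), a ≤ pvBest fp a := by
  induction fp with
  | nil => intro a; simp [pvBest]
  | cons pv t ih =>
    intro a
    have := ih (max a pv.2)
    simp only [pvBest, List.map_cons, List.foldl_cons] at *
    exact le_trans (le_max_left a pv.2) this

lemma pvBest_mem (fp : List (Int × Int)) : ∀ (a : Int),
    pvBest fp a = a ∨ ∃ pv ∈ fp, pv.2 = pvBest fp a := by
  induction fp with
  | nil => intro a; left; simp [pvBest]
  | cons qv t ih =>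
    intro a
    have hb : pvBest (qv :: t) a = pvBest t (max a qv.2) := by
      simp [pvBest]
    rcases ih (max a qv.2) with h | ⟨pv, hm, he⟩
    · rcases max_choice a qv.2 with h2 | h2
      · left; rw [hb, h, h2]
      · right; exact ⟨qv, by simp, by rw [hb, h, h2]⟩
    · right; exact ⟨pv, by simp [hm], by rw [hb, he]⟩

lemma pvRun_spec : ∀ (fp : List (Int × Int)) (mn mp : Int),
    pvRun fp mn mp =
      (pvBest fp mn,
       if pvBest fp mn ≤ mn then mp
       else match fp.find? (fun pv => pv.2 == pvBest fp mn) with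
            | some pv => pv.1
            | none => mp) := by
  intro fp
  induction fp with
  | nil => intro mn mp; simp [pvRun, pvBest]
  | cons qv t ih =>
    intro mn mp
    obtain ⟨p, v⟩ := qv
    have hb : pvBest ((p, v) :: t) mn = pvBest t (max mn v) := by simp [pvBest]
    by_cases hv : mn < v
    · have hmx : max mn v = v := max_eq_right (le_of_lt hv)
      have hB : pvBest ((p, v) :: t) mn = pvBest t v := by rw [hb, hmx]
      have hvB : v ≤ pvBest t v := pvBest_ge t v
      have hnB : ¬ pvBest t v ≤ mn := not_le.mpr (lt_of_lt_of_le hv hvB)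
      rw [show pvRun ((p, v) :: t) mn mp = pvRun t v p by simp [pvRun, hv]]
      rw [ih v p]
      simp only [hB]
      rw [if_neg hnB]
      by_cases hle : pvBest t v ≤ v
      · have heq : pvBest t v = v := le_antisymm hle hvB
        rw [if_pos hle]
        simp [heq]
      · have hlt : v < pvBest t v := not_le.mp hle
        have hne : (v == pvBest t v) = false := beq_eq_false_iff_ne.mpr (ne_of_lt hlt)
        rw [if_neg hle]
        have hsome : (t.find? (fun pv => pv.2 == pvBest t v)).isSome := by
          rcases pvBest_mem t v with h | ⟨pv, hm, he⟩
          · exact absurd h (ne_of_lt hlt).symm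
          · exact List.find?_isSome.mpr ⟨pv, hm, by simp [he]⟩
        obtain ⟨pv, hfind⟩ := Option.isSome_iff_exists.mp hsome
        simp [hne, hfind]
    · have hmx : max mn v = mn := max_eq_left (not_lt.mp hv)
      have hB : pvBest ((p, v) :: t) mn = pvBest t mn := by rw [hb, hmx]
      rw [show pvRun ((p, v) :: t) mn mp = pvRun t mn mp by simp [pvRun, hv]]
      rw [ih mn mp, hB]
      by_cases hle : pvBest t mn ≤ mn
      · simp [hle]
      · have hne : (v == pvBest t mn) = false := by
          exact beq_eq_false_iff_ne.mpr
            (ne_of_lt (lt_of_le_of_lt (not_lt.mp hv) (not_le.mp hle)))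
        simp [hle, hne]

-- ===== VERDICT (by name: the statement is the Claim_ definition above) =====
lemma pvPairs_eq (l : List Int) (skip_p : List Int) :
    ((List.range l.length).filter (fun (p : Nat) => decide ((p : Int) ∉ skip_p))).map
      (fun (p : Nat) => ((p : Int), l.getD p 0)) = pvFP skip_p 0 l := by
  have h1 : ((List.range l.length).filter (fun (p : Nat) => decide ((p : Int) ∉ skip_p))).map
      (fun (p : Nat) => ((p : Int), l.getD p 0))
      = ((List.range l.length).map (fun (p : Nat) => ((p : Int), l.getD p 0))).filter
          (fun pv => decide (pv.1 ∉ skip_p)) := by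
    rw [List.filter_map]
    rfl
  have h2 : (List.range l.length).map (fun (p : Nat) => ((p : Int), l.getD p 0))
      = pvEnum 0 l := by
    have := pvEnum_range l 0
    simpa using this
  rw [h1, h2, pvFP_filter]

-- B's max(values, default=0) versus the running max floored at mn
lemma pvBest_max? (fp : List (Int × Int)) (a : Int) :
    pvBest fp a = max a ((PySem.List.max? (fp.map (fun pv => pv.2)) (fun v => v)).getD a) := by
  cases h : fp.map (fun pv => pv.2) with
  | nil => simp [pvBest, show fp.map Prod.snd = [] from h, PySem.List.max?]
  | cons v vt =>
    have hm : fp.map Prod.snd = v :: vt := h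
    rw [pvBest, hm, pv_fold_max_cons vt a v, PySem.List.max?_id_cons]
    simp

-- ===== VERDICT (by name: the statement is the Claim_ definition above) =====
theorem list_lookup_spec : Claim_equal_list_lookup := by
  intro l skip_p _
  unfold Spec_list_lookup
  simp only [list_lookup, list_lookup_alt]
  rw [pvPairs_eq l skip_p]
  rw [pvA_run skip_p l 0 0 0, pvRun_spec]
  set fp := pvFP skip_p 0 l with hfp
  rw [pvBest_max? fp 0]
  cases hM : PySem.List.max? (fp.map (fun pv => pv.2)) (fun v => v) with
  | none => simp
  | some M =>
    by_cases hMle : M ≤ 0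
    · simp [hMle]
    · have hmx : max 0 M = M := max_eq_right (le_of_lt (not_le.mp hMle))
      rw [Option.getD_some, hmx, if_neg hMle]
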